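-- pv_equiv track=rewrite | github.com/vgrimaldi848/EPICODE | w24d4_progetto/string_text.py | encode_str
-- ===== SOURCE A (Python) =====
-- def encode_str(inStr):
--     outStr = ''
--     charArray = [c for c in inStr]
--     KeysArray = sorted(set(charArray).union())
--     aggrCount = {}
--     for x in KeysArray:
--         aggrCount[x] = charArray.count(x)
--     for x in KeysArray:
--         outStr = f'{outStr}{x}{aggrCount[x]}'
--     return outStr
-- ===== SOURCE B (Python) =====
-- def encode_str(inStr):
--     # sort the characters once so equal ones are adjacent, then run-length encode
--     def rle(s):
--         if not s:
--             return []
--         c = s[0]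
--         run = 1
--         while run < len(s) and s[run] == c:
--             run += 1
--         return [c + str(run)] + rle(s[run:])
--     return ''.join(rle(sorted(inStr)))
-- ===== Notes on version B (the rewrite author's own statement) =====
-- stated objective: alternative
-- what changed: Replaces A's build-sorted-key-set-then-count-each-key strategy (a full .count scan per distinct character plus a dict) with sorting the characters once and a single run-length pass over the sorted sequence.
import Mathlib
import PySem

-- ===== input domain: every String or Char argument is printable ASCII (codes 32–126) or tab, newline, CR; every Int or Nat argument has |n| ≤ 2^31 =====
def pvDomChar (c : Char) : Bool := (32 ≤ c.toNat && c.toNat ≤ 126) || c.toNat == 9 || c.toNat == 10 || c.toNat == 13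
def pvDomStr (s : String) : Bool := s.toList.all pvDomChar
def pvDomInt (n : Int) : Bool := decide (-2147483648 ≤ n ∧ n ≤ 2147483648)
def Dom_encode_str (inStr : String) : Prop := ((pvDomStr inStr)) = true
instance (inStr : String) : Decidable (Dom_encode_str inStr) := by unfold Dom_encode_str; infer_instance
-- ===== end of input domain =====

-- B replaces A's "sorted key set + a full .count scan per key" with one sort and a single
-- run-length pass over the sorted characters.

-- ===== PORT A =====
def encode_str (inStr : String) : String :=
  let charArray := inStr.toList
  let keysArray := PySem.List.sorted (PySem.Set.ofList charArray) (fun x => x) false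
  let aggrCount : PySem.Dict Char Int :=
    keysArray.foldl (fun d x => d.insert x ((PySem.List.count charArray x : Nat) : Int)) PySem.Dict.empty
  -- aggrCount[x]: every x of the second loop was inserted by the first loop over the same
  -- keysArray, so the KeyError branch is unreachable; getD 0 is exact here.
  keysArray.foldl (fun outStr x => outStr ++ String.singleton x ++ PySem.Int.toStr (aggrCount.getD x 0)) ""

-- ===== PORT B =====
-- rleB s: the recursive run-length pass of Source B (the inner while computes the run length,
-- i.e. 1 + takeWhile-length; s[run:] is the dropWhile remainder).
def rleB : List Char → List String
  | [] => []
  | c :: rest =>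
    (String.singleton c ++ PySem.Int.toStr (((rest.takeWhile (fun x => x == c)).length + 1 : Nat) : Int))
      :: rleB (rest.dropWhile (fun x => x == c))
termination_by s => s.length
decreasing_by
  simpa using Nat.lt_succ_of_le (List.length_dropWhile_le _ _)

def encode_str_alt (inStr : String) : String :=
  String.join (rleB (PySem.List.sorted inStr.toList (fun x => x) false))

-- ===== PRECONDITION & SPEC =====
def Spec_encode_str (inStr : String) (out : String) : Prop := out = encode_str_alt inStr
instance (inStr : String) (out : String) : Decidable (Spec_encode_str inStr out) := by unfold Spec_encode_str; infer_instance

-- ===== CLAIM (what is proved, stated in full; the proofs are below) =====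
def Claim_equal_encode_str : Prop := ∀ (inStr : String), Dom_encode_str inStr → Spec_encode_str inStr (encode_str inStr)

-- ===== LEMMAS AND PROOFS =====

-- a fold of inserts over keys not containing x leaves x's entry alone
theorem getD_foldl_insert_not_mem {κ : Type} [BEq κ] [LawfulBEq κ] [DecidableEq κ]
    (ks : List κ) (f : κ → Int) (d : PySem.Dict κ Int) (x : κ) (hx : x ∉ ks) :
    (ks.foldl (fun d k => d.insert k (f k)) d).getD x 0 = d.getD x 0 := by
  induction ks generalizing d with
  | nil => rfl
  | cons a as ih =>
    simp only [List.foldl_cons]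
    rw [ih _ (fun h => hx (List.mem_cons_of_mem _ h)), PySem.Dict.getD_insert]
    simp only [List.mem_cons, not_or] at hx
    simp [hx.1]

-- the value loop: getD after inserting f k for every k of keys
theorem getD_foldl_insert_fun {κ : Type} [BEq κ] [LawfulBEq κ] [DecidableEq κ]
    (keys : List κ) (f : κ → Int) (d : PySem.Dict κ Int) (x : κ) (hx : x ∈ keys) :
    (keys.foldl (fun d k => d.insert k (f k)) d).getD x 0 = f x := by
  induction keys generalizing d with
  | nil => cases hx
  | cons k ks ih =>
    simp only [List.foldl_cons]
    by_cases hmem : x ∈ ks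
    · exact ih _ hmem
    · have hxk : x = k := by
        cases hx with
        | head => rfl
        | tail _ h => exact absurd h hmem
      subst hxk
      rw [getD_foldl_insert_not_mem ks f _ x hmem, PySem.Dict.getD_insert]
      simp

-- String.join peels one element
theorem foldl_str_append (t : List String) (a : String) :
    t.foldl (· ++ ·) a = a ++ t.foldl (· ++ ·) "" := by
  induction t generalizing a with
  | nil => simp
  | cons b bs ih =>
    simp only [List.foldl_cons]
    rw [ih (a ++ b), ih ("" ++ b), String.append_assoc]
    simp

theorem join_cons' (x : String) (t : List String) :
    String.join (x :: t) = x ++ String.join t := by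
  simp only [String.join, List.foldl_cons]
  rw [foldl_str_append t ("" ++ x)]
  simp

-- A's output loop as join-of-map
theorem foldl_append_join (g : Char → String) (keys : List Char) (a : String) :
    keys.foldl (fun out x => out ++ g x) a = a ++ String.join (keys.map g) := by
  induction keys generalizing a with
  | nil => simp [String.join]
  | cons k ks ih =>
    simp only [List.foldl_cons, List.map_cons]
    rw [ih (a ++ g k), join_cons', String.append_assoc]

-- core: run-length encoding of a sorted char list = per-distinct-key counts over it
theorem rleB_eq_map (s : List Char) (h : s.Pairwise (· ≤ ·)) :
    rleB s = (PySem.List.sorted (PySem.Set.ofList s) (fun x => x) false).map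
      (fun x => String.singleton x ++ PySem.Int.toStr ((s.count x : Nat) : Int)) := by
  induction s using rleB.induct with
  | case1 => simp [rleB, PySem.Set.ofList, PySem.List.sorted]
  | case2 c rest ih =>
    have hle : ∀ x ∈ rest, c ≤ x := (List.pairwise_cons.mp h).1
    have hp : rest.Pairwise (· ≤ ·) := (List.pairwise_cons.mp h).2
    have hrec : rest = rest.takeWhile (fun x => x == c) ++ rest.dropWhile (fun x => x == c) :=
      (List.takeWhile_append_dropWhile).symm
    have hrun : ∀ x ∈ rest.takeWhile (fun x => x == c), x = c := by
      intro x hx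
      simpa using List.mem_takeWhile_imp hx
    have hp' : (rest.dropWhile (fun x => x == c)).Pairwise (· ≤ ·) :=
      hp.sublist (List.dropWhile_sublist _)
    have hgt : ∀ x ∈ rest.dropWhile (fun x => x == c), c < x := by
      cases hd : rest.dropWhile (fun x => x == c) with
      | nil => intro x hx; simp at hx
      | cons d ds =>
        have hdmem : d ∈ rest := (List.dropWhile_sublist _).mem (by rw [hd]; exact List.mem_cons_self)
        have hdf : (d == c) = false := by
          have := List.head?_dropWhile_not (fun x => x == c) rest
          rw [hd] at this; simpa using this
        have hdne : d ≠ c := by simpa using hdf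
        have hcd : c < d := lt_of_le_of_ne (hle d hdmem) (Ne.symm hdne)
        intro x hx
        have hx2 : x ∈ d :: ds := hx
        rcases List.mem_cons.mp hx2 with rfl | hx'
        · exact hcd
        · have : d ≤ x := by
            have hp2 : (d :: ds).Pairwise (· ≤ ·) := by rw [hd] at hp'; exact hp'
            have := List.pairwise_cons.mp hp2
            exact this.1 x hx'
          exact lt_of_lt_of_le hcd this
    -- counts
    have hcount_run : (rest.takeWhile (fun x => x == c)).count c =
        (rest.takeWhile (fun x => x == c)).length := by
      rw [List.count_eq_length]
      intro x hx; rw [hrun x hx]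
    have hcount_drop : (rest.dropWhile (fun x => x == c)).count c = 0 := by
      rw [List.count_eq_zero]
      intro hmem; exact absurd rfl (ne_of_gt (hgt c hmem))
    have hcount_c : (c :: rest).count c = (rest.takeWhile (fun x => x == c)).length + 1 := by
      rw [List.count_cons_self]
      conv_lhs => rw [hrec]
      rw [List.count_append, hcount_run, hcount_drop]
    have hcount_x : ∀ x, c < x →
        (c :: rest).count x = (rest.dropWhile (fun x => x == c)).count x := by
      intro x hcx
      rw [List.count_cons_of_ne hcx.ne]
      conv_lhs => rw [hrec]
      rw [List.count_append, List.count_eq_zero.mpr, Nat.zero_add]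
      intro hmem
      exact absurd (hrun x hmem) (ne_of_gt hcx)
    -- keys
    have hkeys : PySem.List.sorted (PySem.Set.ofList (c :: rest)) (fun x => x) false =
        c :: PySem.List.sorted (PySem.Set.ofList (rest.dropWhile (fun x => x == c))) (fun x => x) false := by
      apply PySem.List.sorted_eq_of_perm_of_pairwise_lt
      · have hys_nodup : (c :: PySem.List.sorted (PySem.Set.ofList (rest.dropWhile (fun x => x == c))) (fun x => x) false).Nodup := by
          rw [List.nodup_cons]
          refine ⟨?_, ?_⟩
          · intro hc
            rw [PySem.List.mem_sorted, PySem.Set.mem_ofList] at hc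
            exact absurd rfl (ne_of_gt (hgt c hc))
          · exact (PySem.List.sorted_perm _ _ _).symm.nodup (PySem.Set.nodup_ofList _)
        have hmem : ∀ a, (a ∈ c :: PySem.List.sorted (PySem.Set.ofList (rest.dropWhile (fun x => x == c))) (fun x => x) false) ↔
            a ∈ PySem.Set.ofList (c :: rest) := by
          intro a
          simp only [List.mem_cons, PySem.List.mem_sorted, PySem.Set.mem_ofList]
          constructor
          · rintro (rfl | ha)
            · exact Or.inl rfl
            · exact Or.inr ((List.dropWhile_sublist _).mem ha)
          · rintro (rfl | ha)
            · exact Or.inl rfl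
            · have ha2 : a ∈ rest.takeWhile (fun x => x == c) ++ rest.dropWhile (fun x => x == c) := by
                rw [List.takeWhile_append_dropWhile]; exact ha
              rcases List.mem_append.mp ha2 with h1 | h2
              · exact Or.inl (hrun a h1)
              · exact Or.inr h2
        exact (List.perm_ext_iff_of_nodup hys_nodup (PySem.Set.nodup_ofList _)).mpr hmem
      · rw [List.pairwise_cons]
        refine ⟨?_, ?_⟩
        · intro y hy
          rw [PySem.List.mem_sorted, PySem.Set.mem_ofList] at hy
          exact hgt y hy
        · exact PySem.List.sorted_ofList_pairwise_lt _
    rw [rleB, hkeys, List.map_cons]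
    congr 1
    · rw [hcount_c]
    · rw [ih hp']
      apply List.map_congr_left
      intro x hx
      rw [PySem.List.mem_sorted, PySem.Set.mem_ofList] at hx
      rw [hcount_x x (hgt x hx)]

-- ===== VERDICT (by name: the statement is the Claim_ definition above) =====
theorem encode_str_spec : Claim_equal_encode_str := by
  intro inStr _
  show Spec_encode_str inStr (encode_str inStr)
  unfold Spec_encode_str
  have hpair : (PySem.List.sorted inStr.toList (fun x => x) false).Pairwise (· ≤ ·) :=
    PySem.List.sorted_pairwise inStr.toList (fun x => x)
  have hperm : (PySem.Set.ofList (PySem.List.sorted inStr.toList (fun x => x) false)).Perm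
      (PySem.Set.ofList inStr.toList) := by
    rw [List.perm_ext_iff_of_nodup (PySem.Set.nodup_ofList _) (PySem.Set.nodup_ofList _)]
    intro a
    simp only [PySem.Set.mem_ofList, PySem.List.mem_sorted]
  have hkeys : PySem.List.sorted (PySem.Set.ofList (PySem.List.sorted inStr.toList (fun x => x) false)) (fun x => x) false
      = PySem.List.sorted (PySem.Set.ofList inStr.toList) (fun x => x) false :=
    PySem.List.sorted_eq_sorted_of_perm _ _ _ (fun _ _ hab => hab) hperm
  simp only [encode_str, encode_str_alt]
  simp only [String.append_assoc]
  rw [foldl_append_join, rleB_eq_map _ hpair, hkeys]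
  have hempty : ∀ t : String, "" ++ t = t := fun t => by simp
  rw [hempty]
  apply congrArg
  apply List.map_congr_left
  intro x hx
  rw [getD_foldl_insert_fun _ _ _ _ hx, (PySem.List.sorted_perm inStr.toList (fun x => x) false).count_eq x]
  rw [PySem.List.count_eq]
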